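-- pv_equiv track=rewrite | github.com/colmsjo/antopt | ant-cycle/brute_force.py | all_routes
-- ===== SOURCE A (Python) =====
-- def all_routes(nodes):
--     if len(nodes) <= 1:
--         return [[]]
--
--     res = []
--     head = nodes.pop(0)
--     for i in range(0, len(nodes)):
--         nodes_cp = nodes[:]
--         next_node = nodes_cp.pop(i)
--         res += [[(head, next_node)] + x for x in all_routes([next_node]+nodes_cp)]
--
--     return res
-- ===== SOURCE B (Python) =====
-- import itertools
--
-- def all_routes(nodes):
--     # Flat iteration over itertools.permutations instead of incremental recursion.
--     # Like A, mutates `nodes` by popping its head (only when len(nodes) > 1).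
--     if len(nodes) <= 1:
--         return [[]]
--     head = nodes.pop(0)
--     res = []
--     for perm in itertools.permutations(nodes):
--         seq = [head] + list(perm)
--         res.append([(seq[i], seq[i + 1]) for i in range(len(seq) - 1)])
--     return res
-- ===== Notes on version B (the rewrite author's own statement) =====
-- stated objective: idiomatic
-- what changed: Replaces A's incremental recursion (which prepends one edge per level and concatenates sub-results) by a single flat loop over itertools.permutations of the tail, turning each whole permutation into its edge list with one comprehension.
import Mathlib
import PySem

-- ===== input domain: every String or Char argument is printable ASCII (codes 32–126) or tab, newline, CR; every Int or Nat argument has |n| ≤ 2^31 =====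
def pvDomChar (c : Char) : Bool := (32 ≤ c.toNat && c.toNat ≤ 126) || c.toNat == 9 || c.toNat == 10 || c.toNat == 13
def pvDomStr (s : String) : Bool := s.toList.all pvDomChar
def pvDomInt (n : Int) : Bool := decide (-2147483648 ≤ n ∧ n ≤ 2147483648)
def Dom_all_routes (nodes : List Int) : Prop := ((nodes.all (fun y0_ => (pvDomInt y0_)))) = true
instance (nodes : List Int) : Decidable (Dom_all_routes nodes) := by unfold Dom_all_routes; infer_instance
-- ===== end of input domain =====

-- B replaces A's incremental recursion by one flat loop over itertools-ordered permutations of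
-- the tail (objective: idiomatic).  Both A and B pop the head off the argument list in place
-- when len(nodes) > 1; the equivalence proved here is about the RETURN value.

-- ===== PORT A =====
def all_routes (nodes : List Int) : List (List (Int × Int)) :=
  if nodes.length ≤ 1 then [[]]
  else
    match nodes with
    | [] => [[]]  -- unreachable: length > 1
    | head :: rest =>
      (PySem.List.pyRange 0 (rest.length : Int) 1).foldl
        (fun res i =>
          match h : PySem.List.pop? rest i with
          | none => res  -- unreachable: i is always a valid index
          | some (next_node, nodes_cp) =>
            res ++ (all_routes (next_node :: nodes_cp)).map (fun x => (head, next_node) :: x))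
        []
termination_by nodes.length
decreasing_by
  have hl := PySem.List.length_of_pop?_eq_some rest h
  simp at hl ⊢
  omega

-- ===== PORT B =====
-- hand-written port of itertools.permutations(l) (tuples in itertools' order: pick each index
-- left to right); exact for every list; fuel = l.length makes it structural
def pySelections : List Int → List (Int × List Int)
  | [] => []
  | x :: xs => (x, xs) :: (pySelections xs).map (fun s => (s.1, x :: s.2))

def pyPermsAux : Nat → List Int → List (List Int)
  | 0, _ => [[]]
  | n + 1, l => (pySelections l).flatMap (fun s => (pyPermsAux n s.2).map (fun p => s.1 :: p))

def pyPermutations (l : List Int) : List (List Int) := pyPermsAux l.length l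

-- the comprehension [(seq[i], seq[i+1]) for i in range(len(seq)-1)]; indices are always in range
def pyEdges (seq : List Int) : List (Int × Int) :=
  (PySem.List.pyRange 0 ((seq.length : Int) - 1) 1).map
    (fun i => (PySem.List.pyGetD seq i (-1), PySem.List.pyGetD seq (i + 1) (-1)))

def all_routes_alt (nodes : List Int) : List (List (Int × Int)) :=
  if nodes.length ≤ 1 then [[]]
  else
    match nodes with
    | [] => [[]]  -- unreachable: length > 1
    | head :: rest =>
      (pyPermutations rest).foldl
        (fun res perm => res ++ [pyEdges ([head] ++ perm)])
        []

-- ===== PRECONDITION & SPEC =====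
def Spec_all_routes (nodes : List Int) (out : List (List (Int × Int))) : Prop := out = all_routes_alt nodes
instance (nodes : List Int) (out : List (List (Int × Int))) : Decidable (Spec_all_routes nodes out) := by unfold Spec_all_routes; infer_instance

-- ===== CLAIM (what is proved, stated in full; the proofs are below) =====
def Claim_equal_all_routes : Prop := ∀ (nodes : List Int), Dom_all_routes nodes → Spec_all_routes nodes (all_routes nodes)

-- ===== LEMMAS AND PROOFS =====

lemma flatMap_congr_mem {α β : Type} {l : List α} {f g : α → List β}
    (h : ∀ x ∈ l, f x = g x) : l.flatMap f = l.flatMap g := by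
  induction l with
  | nil => rfl
  | cons a t ih =>
    simp only [List.flatMap_cons]
    rw [h a (by simp), ih (fun x hx => h x (by simp [hx]))]

lemma pyEdges_eq_zip (l : List Int) : pyEdges l = l.zip l.tail := by
  unfold pyEdges
  rw [PySem.List.pyRange_one]
  apply List.ext_getElem
  · simp [List.length_zip]
  · intro k hk1 hk2
    simp only [List.length_map, List.length_range] at hk1
    have hk : k < l.length - 1 := by omega
    simp only [List.getElem_map, List.getElem_range, List.getElem_zip]
    have h1 : (0 : Int) + (k : Int) = ((k : Nat) : Int) := by ring
    have h2 : ((k : Nat) : Int) + 1 = (((k + 1 : Nat)) : Int) := by push_cast; ring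
    rw [h1, h2, PySem.List.pyGetD_natCast, PySem.List.pyGetD_natCast]
    rw [List.getD_eq_getElem l _ (by omega), List.getD_eq_getElem l _ (by omega)]
    simp [List.getElem_tail]

lemma selections_eq (t : List Int) :
    pySelections t = (List.range t.length).map (fun k => (t.getD k 0, t.eraseIdx k)) := by
  induction t with
  | nil => rfl
  | cons x xs ih =>
    simp only [pySelections, ih, List.length_cons, List.range_succ_eq_map, List.map_cons,
      List.map_map]
    refine List.cons_eq_cons.mpr ⟨rfl, ?_⟩
    apply List.map_congr_left
    intro k hk
    simp [List.getD]

lemma main_lemma : ∀ (n : Nat) (t : List Int) (head : Int), t.length ≤ n →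
    all_routes (head :: t) = (pyPermutations t).map (fun p => (head :: p).zip p) := by
  intro n
  induction n with
  | zero =>
    intro t head ht
    have : t = [] := List.eq_nil_of_length_eq_zero (by omega)
    subst this
    simp [all_routes, pyPermutations, pyPermsAux]
  | succ m ih =>
    intro t head ht
    match t with
    | [] => simp [all_routes, pyPermutations, pyPermsAux]
    | a :: t' =>
      rw [all_routes]
      have hlen : ¬ ((head :: a :: t').length ≤ 1) := by simp
      rw [if_neg hlen]
      rw [PySem.List.foldl_congr_mem _ _
        (fun res i => res ++ ((all_routes ((a :: t').getD i.toNat 0 :: (a :: t').eraseIdx i.toNat)).map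
            (fun x => (head, (a :: t').getD i.toNat 0) :: x))) _
        (by
          intro acc i hi
          rw [PySem.List.mem_pyRange_one] at hi
          obtain ⟨h0, h1⟩ := hi
          obtain ⟨k, rfl⟩ : ∃ k : ℕ, i = (k : ℤ) := ⟨i.toNat, by omega⟩
          have hlt : k < (a :: t').length := by exact_mod_cast h1
          have hpop := PySem.List.pop?_natCast (a :: t') k hlt
          split
          · next heq => simp [hpop] at heq
          · next nn cp heq =>
            rw [hpop] at heq
            obtain ⟨rfl, rfl⟩ : (a :: t')[k] = nn ∧ (a :: t').eraseIdx k = cp := by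
              simpa using heq
            simp only [Int.toNat_natCast, List.getD_eq_getElem?_getD,
              List.getElem?_eq_getElem hlt, Option.getD_some])]
      rw [PySem.List.foldl_append_eq_flatMap]
      simp only [List.nil_append]
      rw [PySem.List.pyRange_one]
      rw [List.flatMap_map]
      conv_rhs => rw [pyPermutations]
      simp only [List.length_cons]
      rw [pyPermsAux]
      rw [List.map_flatMap]
      rw [selections_eq]
      rw [List.flatMap_map]
      simp only [Int.sub_zero, Int.toNat_natCast, List.length_cons]
      apply flatMap_congr_mem
      intro k hk
      rw [List.mem_range] at hk
      have htoNat : ((0 : Int) + (k : Int)).toNat = k := by omega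
      simp only [htoNat]
      have herase : ((a :: t').eraseIdx k).length = t'.length := by
        rw [List.length_eraseIdx_of_lt (by simpa using hk)]; simp
      have hfuel : pyPermsAux t'.length ((a :: t').eraseIdx k) = pyPermutations ((a :: t').eraseIdx k) := by
        rw [pyPermutations, herase]
      rw [hfuel]
      rw [ih ((a :: t').eraseIdx k) _ (by rw [herase]; simp at ht; omega)]
      rw [List.map_map, List.map_map]
      apply List.map_congr_left
      intro p hp
      simp [List.zip_cons_cons]

-- ===== VERDICT (by name: the statement is the Claim_ definition above) =====
theorem all_routes_spec : Claim_equal_all_routes := by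
  unfold Claim_equal_all_routes Spec_all_routes
  intro nodes _
  match nodes with
  | [] => simp [all_routes, all_routes_alt]
  | [x] => simp [all_routes, all_routes_alt]
  | head :: a :: t =>
    rw [main_lemma (a :: t).length (a :: t) head le_rfl]
    rw [all_routes_alt]
    have hlen : ¬ ((head :: a :: t).length ≤ 1) := by simp
    rw [if_neg hlen]
    rw [PySem.List.foldl_append_singleton_eq_map (fun perm => pyEdges ([head] ++ perm))]
    simp only [List.nil_append]
    apply List.map_congr_left
    intro p hp
    rw [pyEdges_eq_zip]
    rfl
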